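-- pv_equiv track=rewrite | github.com/Rahul20037237/DSA_and_problem_solving | reverse.py | cyclic_shift_count
-- ===== SOURCE A (Python) =====
-- def cyclic_shift_count(length, cycle, s):
--     max_binary = '1' * length  # Maximum binary number of length 'length'
--     occurrences = []
--     original = s
--
--     # Perform cyclic shifts and find occurrences of max_binary
--     for i in range(length):
--         s = s[1:] + s[0]  # Perform cyclic shift
--         if s == max_binary:
--             occurrences.append(i + 1)  # Record occurrence index (1-indexed)
--             if len(occurrences) == cycle:
--                 return occurrences[-1]  # Return the index of the cycle-th occurrence
--
--     return -1  # If there are not enough occurrences, return -1 as per problem statement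
-- ===== SOURCE B (Python) =====
-- def cyclic_shift_count(length, cycle, s):
--     # Every cyclic shift preserves length and the multiset of characters, so a
--     # shift equals '1'*length iff s itself is the all-ones string of that length;
--     # then every shift matches and the cycle-th occurrence is at index cycle.
--     if len(s) == length and all(c == '1' for c in s) and 1 <= cycle <= length:
--         return cycle
--     return -1
-- ===== Notes on version B (the rewrite author's own statement) =====
-- stated objective: faster
-- what changed: Replaces the O(length^2) shift-and-compare loop with an O(len(s)) closed form: a shift matches iff s is the all-ones string of the given length, so the answer is cycle when 1 <= cycle <= length, else -1.
import Mathlib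
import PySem

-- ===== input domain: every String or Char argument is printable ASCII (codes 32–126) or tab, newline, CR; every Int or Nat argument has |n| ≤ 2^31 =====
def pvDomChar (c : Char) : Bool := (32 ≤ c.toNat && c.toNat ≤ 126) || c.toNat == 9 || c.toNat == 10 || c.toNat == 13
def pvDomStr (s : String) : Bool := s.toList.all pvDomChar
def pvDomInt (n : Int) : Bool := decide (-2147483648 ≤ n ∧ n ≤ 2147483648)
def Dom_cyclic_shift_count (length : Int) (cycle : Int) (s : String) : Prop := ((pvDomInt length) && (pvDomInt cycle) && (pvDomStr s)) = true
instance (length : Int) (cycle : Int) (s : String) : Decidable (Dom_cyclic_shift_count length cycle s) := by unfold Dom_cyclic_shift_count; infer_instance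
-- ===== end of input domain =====

-- B replaces A's O(length^2) shift-and-compare loop by a closed form (a cyclic shift
-- matches '1'*length iff s itself is all ones of that length); objective: faster.

-- ===== PORT A =====
-- s[1:] + s[0] on a list of chars; on the empty list Python raises IndexError at s[0]
-- (excluded by Pre_), the port returns [] there.
def pvShift (s : List Char) : List Char :=
  s.drop 1 ++ (PySem.List.pyGet? s 0).toList

-- the 'for i in range(length)' loop with state (s, occurrences) and early return
def pvLoop (maxb : List Char) (cycle : Int) :
    List Int → List Char → List Int → Int
  | [], _, _ => -1
  | i :: rest, s, occ =>
    let s' := pvShift s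
    if s' = maxb then
      let occ' := occ ++ [i + 1]
      if (occ'.length : Int) = cycle then
        (PySem.List.pyGet? occ' (-1)).getD (-1)   -- occurrences[-1]; occ' is nonempty
      else pvLoop maxb cycle rest s' occ'
    else pvLoop maxb cycle rest s' occ

def cyclic_shift_count (length : Int) (cycle : Int) (s : String) : Int :=
  -- max_binary = '1' * length ('' for length ≤ 0)
  pvLoop (List.replicate length.toNat '1') cycle (PySem.List.pyRange 0 length 1) s.toList []

-- ===== PORT B =====
def cyclic_shift_count_alt (length : Int) (cycle : Int) (s : String) : Int :=
  if (s.toList.length : Int) = length ∧ s.toList.all (· = '1')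
      ∧ 1 ≤ cycle ∧ cycle ≤ length then cycle
  else -1

-- ===== PRECONDITION & SPEC =====
-- Pre_ excludes exactly the inputs where Python A raises IndexError (s[0] on the empty string).
def Pre_cyclic_shift_count (length : Int) (cycle : Int) (s : String) : Prop :=
  length ≤ 0 ∨ s ≠ ""
instance (length : Int) (cycle : Int) (s : String) : Decidable (Pre_cyclic_shift_count length cycle s) := by unfold Pre_cyclic_shift_count; infer_instance

def pvWitness_cyclic_shift_count : Int × Int × String := (3, 2, "111")

def Spec_cyclic_shift_count (length : Int) (cycle : Int) (s : String) (out : Int) : Prop := out = cyclic_shift_count_alt length cycle s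
instance (length : Int) (cycle : Int) (s : String) (out : Int) : Decidable (Spec_cyclic_shift_count length cycle s out) := by unfold Spec_cyclic_shift_count; infer_instance

-- ===== CLAIM (what is proved, stated in full; the proofs are below) =====
def Claim_equal_cyclic_shift_count : Prop := ∀ (length : Int) (cycle : Int) (s : String), Dom_cyclic_shift_count length cycle s → Pre_cyclic_shift_count length cycle s → Spec_cyclic_shift_count length cycle s (cyclic_shift_count length cycle s)
-- ===== LEMMAS AND PROOFS =====

-- a cyclic shift is a permutation of the list
theorem pvShift_perm (s : List Char) : (pvShift s).Perm s := by
  cases s with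
  | nil => simp [pvShift, PySem.List.pyGet?, PySem.List.pyIdx?]
  | cons c t => simp [pvShift]

-- "is the all-ones string of length n" as a predicate
def pvOnes (n : Nat) (s : List Char) : Prop := s.length = n ∧ ∀ c ∈ s, c = '1'

theorem pvOnes_iff_replicate (n : Nat) (s : List Char) :
    pvOnes n s ↔ s = List.replicate n '1' := by
  constructor
  · rintro ⟨h1, h2⟩; exact List.eq_replicate_iff.mpr ⟨h1, h2⟩
  · rintro rfl; exact ⟨List.length_replicate, fun c hc => List.eq_of_mem_replicate hc⟩

theorem pvOnes_shift (n : Nat) (s : List Char) : pvOnes n (pvShift s) ↔ pvOnes n s := by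
  unfold pvOnes
  constructor
  · rintro ⟨h1, h2⟩
    exact ⟨((pvShift_perm s).length_eq).symm.trans h1,
      fun c hc => h2 c ((pvShift_perm s).mem_iff.mpr hc)⟩
  · rintro ⟨h1, h2⟩
    exact ⟨((pvShift_perm s).length_eq).trans h1,
      fun c hc => h2 c ((pvShift_perm s).mem_iff.mp hc)⟩

theorem pvShift_replicate (n : Nat) :
    pvShift (List.replicate n '1') = List.replicate n '1' := by
  rw [← pvOnes_iff_replicate]
  rw [pvOnes_shift]
  rw [pvOnes_iff_replicate]

-- if s is never all-ones, the loop never matches and returns -1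
theorem pvLoop_nomatch (n : Nat) (cycle : Int) (l : List Int) (s : List Char)
    (occ : List Int) (h : ¬ pvOnes n s) :
    pvLoop (List.replicate n '1') cycle l s occ = -1 := by
  induction l generalizing s occ with
  | nil => rfl
  | cons i rest ih =>
    have hne : pvShift s ≠ List.replicate n '1' := by
      intro he
      exact h ((pvOnes_shift n s).mp ((pvOnes_iff_replicate n _).mpr he))
    simp only [pvLoop, if_neg hne]
    exact ih _ _ (fun hh => h ((pvOnes_shift n s).mp hh))

-- on the all-ones string every iteration matches
theorem pvLoop_ones (n : Nat) (cycle : Int) (a : Int) (occ : List Int)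
    (ha : 0 ≤ a) (han : a ≤ (n : Int)) (hocc : (occ.length : Int) = a) :
    pvLoop (List.replicate n '1') cycle (PySem.List.pyRange a n 1)
      (List.replicate n '1') occ =
      if a < cycle ∧ cycle ≤ (n : Int) then cycle else -1 := by
  by_cases hlt : a < (n : Int)
  · rw [PySem.List.pyRange_one_cons hlt]
    simp only [pvLoop, pvShift_replicate]
    by_cases hc : ((occ ++ [a + 1]).length : Int) = cycle
    · have hcy : cycle = a + 1 := by
        simp at hc; omega
      rw [if_pos hc]
      rw [PySem.List.pyGet?_neg_one_append_singleton]
      simp only [Option.getD_some]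
      have hcond : a < cycle ∧ cycle ≤ (n : Int) := ⟨by omega, by omega⟩
      rw [if_pos hcond, if_pos trivial]
      omega
    · rw [if_neg hc]
      have hne : cycle ≠ a + 1 := by simp at hc; omega
      have := pvLoop_ones n cycle (a + 1) (occ ++ [a + 1]) (by omega) (by omega)
        (by simp; omega)
      rw [this]
      split_ifs with h1 h2 h2 <;> first | rfl | omega
  · rw [PySem.List.pyRange_one_eq_nil (by omega)]
    have : ¬ (a < cycle ∧ cycle ≤ (n : Int)) := by omega
    rw [if_neg this]
    rfl
termination_by ((n : Int) - a).toNat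
decreasing_by omega

-- ===== VERDICT (by name: the statement is the Claim_ definition above) =====
theorem cyclic_shift_count_spec : Claim_equal_cyclic_shift_count := by
  intro length cycle s _ _
  unfold Spec_cyclic_shift_count cyclic_shift_count cyclic_shift_count_alt
  by_cases hones : pvOnes length.toNat s.toList
  · obtain ⟨hlen, hall⟩ := hones
    have hrep : s.toList = List.replicate length.toNat '1' :=
      (pvOnes_iff_replicate _ _).mp ⟨hlen, hall⟩
    by_cases hpos : 0 < length
    · obtain ⟨n, rfl⟩ : ∃ n : Nat, length = (n : Int) := ⟨length.toNat, by omega⟩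
      simp only [Int.toNat_natCast] at hrep ⊢
      rw [hrep]
      rw [pvLoop_ones n cycle 0 [] le_rfl (by omega) (by simp)]
      have hlenr : (((List.replicate n '1').length : Nat) : Int) = (n : Int) := by simp
      have hallr : (List.replicate n '1').all (· = '1') = true := by simp
      split_ifs with h1 h2 h2
      · rfl
      · exact absurd ⟨hlenr, hallr, by omega, by omega⟩ h2
      · obtain ⟨_, _, hc1, hc2⟩ := h2; omega
      · rfl
    · -- length ≤ 0: empty range, loop returns -1; B's 1 ≤ cycle ≤ length is unsatisfiable
      rw [PySem.List.pyRange_one_eq_nil (by omega)]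
      have hno : ¬ ((s.toList.length : Int) = length ∧ s.toList.all (· = '1') = true
          ∧ 1 ≤ cycle ∧ cycle ≤ length) := by
        rintro ⟨_, _, hc1, hc2⟩; omega
      rw [if_neg hno]
      rfl
  · rw [pvLoop_nomatch length.toNat cycle _ _ _ hones]
    have hno : ¬ ((s.toList.length : Int) = length ∧ s.toList.all (· = '1') = true
        ∧ 1 ≤ cycle ∧ cycle ≤ length) := by
      rintro ⟨h1, h2, hc1, hc2⟩
      apply hones
      refine ⟨by omega, fun c hc => ?_⟩
      have := List.all_eq_true.mp h2 c hc
      simpa using this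
    rw [if_neg hno]
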